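-- pv_equiv track=rewrite | github.com/fenjaWagner/TTBMMT | single_trace.py | find_double_indices
-- ===== SOURCE A (Python) =====
-- def find_double_indices(term):
--     dim_set = set()
--     single_indices = {}
--     double_indices = {}
--
--     for i in range(len(term)):
--         dim = term[i]
--         if dim in dim_set:
--             if dim in single_indices:
--                 i_list = single_indices.pop(dim)
--                 double_indices[dim] = i_list
--             double_indices[dim].append(i)
--         else:
--             dim_set.add(dim)
--             single_indices[dim] = [i]
--
--     return single_indices, double_indices
-- ===== SOURCE B (Python) =====
-- def find_double_indices(term):
--     # Group all indices by symbol in one pass, then partition: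
--     # length-1 groups are singles; a group is registered as double at its
--     # second occurrence (so registration order matches detection order).
--     groups = {}
--     for i, dim in enumerate(term):
--         groups.setdefault(dim, []).append(i)
--
--     single_indices = {dim: ix for dim, ix in groups.items() if len(ix) == 1}
--
--     double_indices = {}
--     for i, dim in enumerate(term):
--         ix = groups[dim]
--         if len(ix) > 1 and i == ix[1]:
--             double_indices[dim] = ix
--
--     return single_indices, double_indices
-- ===== Notes on version B (the rewrite author's own statement) =====
-- stated objective: alternative
-- what changed: Replaces A's single pass that migrates entries between two dicts (with set membership tracking and pop) by a group-then-partition scheme: one pass builds an index-group dict per symbol, then length-1 groups become singles and each multi group is registered as a double at its second occurrence.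
import Mathlib
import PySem

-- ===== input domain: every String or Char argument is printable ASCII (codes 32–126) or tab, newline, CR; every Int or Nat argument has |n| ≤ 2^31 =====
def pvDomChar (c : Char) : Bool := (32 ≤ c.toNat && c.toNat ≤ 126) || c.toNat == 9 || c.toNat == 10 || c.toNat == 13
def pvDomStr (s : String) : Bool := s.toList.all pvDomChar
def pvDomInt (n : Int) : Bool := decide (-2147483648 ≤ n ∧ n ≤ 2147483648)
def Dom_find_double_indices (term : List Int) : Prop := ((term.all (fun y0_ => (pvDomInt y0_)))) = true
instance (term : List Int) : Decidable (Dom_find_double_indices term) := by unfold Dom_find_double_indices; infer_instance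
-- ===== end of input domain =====

-- B changes the decomposition (group all indices per symbol once, then partition by group size)
-- with the same O(n) cost; objective: alternative.

-- ===== PORT A =====
def find_double_indices (term : List Int) : (List (Int × List Int)) × (List (Int × List Int)) :=
  let st :=
    (PySem.List.pyRange 0 (term.length : Int) 1).foldl
      (fun st i =>
        let dim := PySem.List.pyGetD term i 0
        if PySem.Set.contains st.1 dim then
          if st.2.1.contains dim then
            -- i_list = single_indices.pop(dim): the key is present (just checked), so pop = lookup + erase
            let iList := st.2.1.getD dim []
            (st.1, st.2.1.erase dim, (st.2.2.insert dim iList).modify dim [] (· ++ [i]))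
          else
            (st.1, st.2.1, st.2.2.modify dim [] (· ++ [i]))
        else
          (PySem.Set.add st.1 dim, st.2.1.insert dim [i], st.2.2))
      ((PySem.Set.empty : PySem.Set Int),
       (PySem.Dict.empty : PySem.Dict Int (List Int)),
       (PySem.Dict.empty : PySem.Dict Int (List Int)))
  (st.2.1.items, st.2.2.items)

-- ===== PORT B =====
def find_double_indices_alt (term : List Int) : (List (Int × List Int)) × (List (Int × List Int)) :=
  -- groups.setdefault(dim, []).append(i)  ==  modify dim [] (· ++ [i])
  let groups := (PySem.List.enumerate term).foldl
      (fun g p => g.modify p.2 [] (· ++ [p.1]))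
      (PySem.Dict.empty : PySem.Dict Int (List Int))
  -- {dim: ix for dim, ix in groups.items() if len(ix) == 1}
  let singles := groups.items.foldl
      (fun d p => if p.2.length == 1 then d.insert p.1 p.2 else d)
      (PySem.Dict.empty : PySem.Dict Int (List Int))
  let doubles := (PySem.List.enumerate term).foldl
      (fun d p =>
        let ix := groups.getD p.2 []   -- groups[dim]; dim is always a key of groups by construction
        if ix.length > 1 && (PySem.List.pyGetD ix 1 0 == p.1) then d.insert p.2 ix else d)
      (PySem.Dict.empty : PySem.Dict Int (List Int))
  (singles.items, doubles.items)

-- ===== PRECONDITION & SPEC =====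
def Spec_find_double_indices (term : List Int) (out : (List (Int × List Int)) × (List (Int × List Int))) : Prop := out = find_double_indices_alt term
instance (term : List Int) (out : (List (Int × List Int)) × (List (Int × List Int))) : Decidable (Spec_find_double_indices term out) := by unfold Spec_find_double_indices; infer_instance

-- ===== CLAIM (what is proved, stated in full; the proofs are below) =====
def Claim_equal_find_double_indices : Prop := ∀ (term : List Int), Dom_find_double_indices term → Spec_find_double_indices term (find_double_indices term)

-- ===== LEMMAS AND PROOFS =====

-- indices at which the value d occurs, in order
def occAt (ps : List (Int × Int)) (d : Int) : List Int := (ps.filter (fun p => p.2 == d)).map (·.1)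

-- the groups dict built by B's first loop
def Gdict (ps : List (Int × Int)) : PySem.Dict Int (List Int) :=
  ps.foldl (fun g p => g.modify p.2 [] (· ++ [p.1])) PySem.Dict.empty

-- B's second-loop guard: p is the second occurrence of its value
def dblGuard (full : List (Int × Int)) (p : Int × Int) : Bool :=
  (occAt full p.2).length > 1 && (PySem.List.pyGetD (occAt full p.2) 1 0 == p.1)

-- A's loop body, on (index, value) pairs
def stepA (st : PySem.Set Int × PySem.Dict Int (List Int) × PySem.Dict Int (List Int))
    (p : Int × Int) : PySem.Set Int × PySem.Dict Int (List Int) × PySem.Dict Int (List Int) :=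
  if PySem.Set.contains st.1 p.2 then
    if st.2.1.contains p.2 then
      (st.1, st.2.1.erase p.2, (st.2.2.insert p.2 (st.2.1.getD p.2 [])).modify p.2 [] (· ++ [p.1]))
    else
      (st.1, st.2.1, st.2.2.modify p.2 [] (· ++ [p.1]))
  else
    (PySem.Set.add st.1 p.2, st.2.1.insert p.2 [p.1], st.2.2)

theorem getD_Gdict (ps : List (Int × Int)) (d : Int) : (Gdict ps).getD d [] = occAt ps d := by
  have hG : Gdict ps
      = List.foldl (fun g p => g.modify p.1 [] fun x => x ++ [p.2]) PySem.Dict.empty (ps.map Prod.swap) := by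
    rw [List.foldl_map]; rfl
  rw [hG, PySem.Dict.getD_foldl_modify_append]
  simp [occAt, List.filter_map, List.map_map, Function.comp_def, Prod.swap]

theorem keys_Gdict (ps : List (Int × Int)) : (Gdict ps).keys = PySem.Set.ofList (ps.map (·.2)) := by
  have := PySem.Dict.keys_foldl_modify_key ps (fun p => p.2) ([] : List Int)
    (fun _ p v => v ++ [p.1]) PySem.Dict.empty
  simpa [Gdict, PySem.Dict.keys_empty, PySem.Set.update_nil_left] using this

theorem nodup_keys_Gdict (ps : List (Int × Int)) : (Gdict ps).keys.Nodup := by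
  exact PySem.Dict.nodup_keys_foldl_modify_key ps (fun p => p.2) ([] : List Int)
    (fun _ p v => v ++ [p.1]) PySem.Dict.empty PySem.Dict.nodup_keys_empty

-- every item of the groups dict is (key, occurrence list of that key)
theorem items_Gdict_val (ps : List (Int × Int)) {p : Int × List Int}
    (hp : p ∈ (Gdict ps).items) : p.2 = occAt ps p.1 := by
  have h1 : (Gdict ps).get? p.1 = some p.2 :=
    PySem.Dict.get?_of_mem_items _ (by exact hp) (nodup_keys_Gdict ps)
  have h2 := getD_Gdict ps p.1
  rw [PySem.Dict.getD_eq_get?_getD, h1] at h2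
  simpa using h2

theorem mem_vals_iff_occ (ps : List (Int × Int)) (d : Int) :
    d ∈ ps.map (·.2) ↔ occAt ps d ≠ [] := by
  simp only [occAt, ne_eq, List.map_eq_nil_iff, List.filter_eq_nil_iff]
  constructor
  · rintro h hc
    obtain ⟨p, hp, hpd⟩ := List.mem_map.mp h
    exact hc p hp (by simp [hpd])
  · intro h
    by_contra hd
    exact h (fun p hp hb => hd (by
      refine List.mem_map.mpr ⟨p, hp, ?_⟩
      simpa using hb))

theorem mem_items_Gdict (ps : List (Int × Int)) (d : Int) (hd : d ∈ ps.map (·.2)) :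
    (d, occAt ps d) ∈ (Gdict ps).items := by
  have hc : (Gdict ps).contains d = true := by
    rw [PySem.Dict.contains_iff_mem_keys, keys_Gdict]
    exact (PySem.Set.mem_ofList _ _).mpr hd
  rw [PySem.Dict.contains_eq_isSome_get?] at hc
  obtain ⟨v, hv⟩ := Option.isSome_iff_exists.mp hc
  have h2 := getD_Gdict ps d
  rw [PySem.Dict.getD_eq_get?_getD, hv] at h2
  simp only [Option.getD_some] at h2
  subst h2
  exact PySem.Dict.mem_items_of_get?_eq_some _ hv

theorem occ_snoc_self (ps : List (Int × Int)) (i d : Int) :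
    occAt (ps ++ [(i, d)]) d = occAt ps d ++ [i] := by
  simp [occAt]

theorem occ_snoc_ne (ps : List (Int × Int)) (i d e : Int) (h : e ≠ d) :
    occAt (ps ++ [(i, d)]) e = occAt ps e := by
  simp [occAt, List.filter_append, Ne.symm h]

theorem Gdict_snoc (ps : List (Int × Int)) (p : Int × Int) :
    Gdict (ps ++ [p]) = (Gdict ps).modify p.2 [] (· ++ [p.1]) := by
  simp [Gdict, List.foldl_append]

theorem ofList_snoc {α : Type} [BEq α] (l : List α) (x : α) :
    PySem.Set.ofList (l ++ [x]) = PySem.Set.add (PySem.Set.ofList l) x := by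
  simp [PySem.Set.ofList, List.foldl_append]

theorem pyGetD_one (xs : List Int) : PySem.List.pyGetD xs 1 0 = xs.getD 1 0 := by
  have := PySem.List.pyGetD_natCast xs 1 0; simpa using this

theorem occ_mem (ps : List (Int × Int)) (e x : Int) (hx : x ∈ occAt ps e) :
    ∃ q ∈ ps, q.1 = x ∧ q.2 = e := by
  simp only [occAt, List.mem_map, List.mem_filter] at hx
  obtain ⟨q, ⟨hq, hqe⟩, hqx⟩ := hx
  exact ⟨q, hq, hqx, by simpa using hqe⟩

theorem guard_iff (ps : List (Int × Int)) (p : Int × Int) :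
    dblGuard ps p = true ↔ 1 < (occAt ps p.2).length ∧ (occAt ps p.2).getD 1 0 = p.1 := by
  simp [dblGuard, pyGetD_one]

theorem nodupL (ps : List (Int × Int)) (h : ps.Pairwise (fun p q => p.1 < q.1)) :
    ((ps.filter (dblGuard ps)).map (·.2)).Nodup := by
  refine (List.pairwise_map).mpr ?_
  have hf : (ps.filter (dblGuard ps)).Pairwise (fun p q => p.1 < q.1) := h.filter _
  refine hf.imp_of_mem ?_
  intro a b ha hb hlt heq
  have ga := ((guard_iff ps a).mp (List.mem_filter.mp ha).2).2
  have gb := ((guard_iff ps b).mp (List.mem_filter.mp hb).2).2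
  rw [heq] at ga
  rw [ga] at gb
  exact absurd gb (ne_of_lt hlt)

-- the doubles association list built so far
theorem keys_dbl (ps : List (Int × Int)) :
    (PySem.Dict.mk ((ps.filter (dblGuard ps)).map (fun p => (p.2, occAt ps p.2)))).keys
      = (ps.filter (dblGuard ps)).map (·.2) := by
  simp [PySem.Dict.keys_mk, List.map_map, Function.comp_def]

theorem mem_dbl_keys (ps : List (Int × Int)) (e : Int)
    (he : e ∈ (ps.filter (dblGuard ps)).map (·.2)) : 1 < (occAt ps e).length := by
  obtain ⟨q, hq, hqe⟩ := List.mem_map.mp he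
  have := ((guard_iff ps q).mp (List.mem_filter.mp hq).2).1
  rwa [hqe] at this

theorem mem_dbl_items (ps : List (Int × Int)) (d : Int) (hc : 1 < (occAt ps d).length) :
    (d, occAt ps d) ∈ (ps.filter (dblGuard ps)).map (fun p => (p.2, occAt ps p.2)) := by
  have hmem : (occAt ps d).getD 1 0 ∈ occAt ps d := by
    rw [List.getD_eq_getElem _ _ hc]; exact List.getElem_mem hc
  obtain ⟨q, hq, hq1, hq2⟩ := occ_mem ps d _ hmem
  refine List.mem_map.mpr ⟨q, List.mem_filter.mpr ⟨hq, ?_⟩, by rw [hq2]⟩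
  exact (guard_iff ps q).mpr ⟨by rwa [hq2], by rw [hq2, hq1]⟩

theorem singles_contains (ps : List (Int × Int)) (d : Int) :
    (PySem.Dict.mk ((Gdict ps).items.filter (fun p => p.2.length == 1))).contains d = true
      ↔ (occAt ps d).length = 1 := by
  constructor
  · intro hc
    simp only [PySem.Dict.contains, List.any_eq_true, List.mem_filter] at hc
    obtain ⟨p, ⟨hp, hp1⟩, hpd⟩ := hc
    have := items_Gdict_val ps hp
    have hpd' : p.1 = d := by simpa using hpd
    rw [hpd'] at this
    rw [← this]
    simpa using hp1
  · intro hc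
    have hd : d ∈ ps.map (·.2) :=
      (mem_vals_iff_occ ps d).mpr (by intro h0; rw [h0] at hc; simp at hc)
    have hm := mem_items_Gdict ps d hd
    simp only [PySem.Dict.contains, List.any_eq_true, List.mem_filter]
    exact ⟨(d, occAt ps d), ⟨hm, by simp [hc]⟩, by simp⟩

theorem nodup_keys_singles (ps : List (Int × Int)) :
    (PySem.Dict.mk ((Gdict ps).items.filter (fun p => p.2.length == 1))).keys.Nodup := by
  rw [PySem.Dict.keys_mk]
  have hsub : List.Sublist (((Gdict ps).items.filter (fun p => p.2.length == 1)).map (·.1))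
      ((Gdict ps).items.map (·.1)) := List.Sublist.map _ List.filter_sublist
  exact (nodup_keys_Gdict ps).sublist hsub

theorem singles_getD (ps : List (Int × Int)) (d : Int) (hc : (occAt ps d).length = 1) :
    (PySem.Dict.mk ((Gdict ps).items.filter (fun p => p.2.length == 1))).getD d [] = occAt ps d := by
  have hd : d ∈ ps.map (·.2) :=
    (mem_vals_iff_occ ps d).mpr (by intro h0; rw [h0] at hc; simp at hc)
  have hm : (d, occAt ps d) ∈ (Gdict ps).items.filter (fun p => p.2.length == 1) :=
    List.mem_filter.mpr ⟨mem_items_Gdict ps d hd, by simp [hc]⟩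
  have := PySem.Dict.get?_of_mem_items _ hm (nodup_keys_singles ps)
  rw [PySem.Dict.getD_eq_get?_getD, this]; rfl

theorem filter_map_replace (l : List (Int × List Int)) (d : Int) (w : List Int)
    (hw : w.length ≠ 1) (hu : ∀ p ∈ l, p.1 = d → p.2.length = 1) :
    (l.map (fun p => if p.1 == d then (d, w) else p)).filter (fun p => p.2.length == 1)
      = (l.filter (fun p => p.2.length == 1)).filter (fun p => !(p.1 == d)) := by
  induction l with
  | nil => rfl
  | cons a t ih =>
    have iht := ih (fun p hp => hu p (List.mem_cons_of_mem a hp))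
    by_cases had : a.1 = d
    · have ha1 : a.2.length = 1 := hu a (List.mem_cons_self) had
      simp [had, hw, ha1, List.filter_filter] at iht ⊢
      exact iht
    · by_cases h1 : a.2.length = 1 <;>
        · simp [had, h1, List.filter_filter] at iht ⊢
          exact iht

theorem filter_map_replace₂ (l : List (Int × List Int)) (d : Int) (w : List Int)
    (hw : w.length ≠ 1) (hu : ∀ p ∈ l, p.1 = d → p.2.length ≠ 1) :
    (l.map (fun p => if p.1 == d then (d, w) else p)).filter (fun p => p.2.length == 1)
      = l.filter (fun p => p.2.length == 1) := by
  induction l with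
  | nil => rfl
  | cons a t ih =>
    have iht := ih (fun p hp => hu p (List.mem_cons_of_mem a hp))
    by_cases had : a.1 = d
    · have ha1 : a.2.length ≠ 1 := hu a (List.mem_cons_self) had
      simp [had, hw, ha1] at iht ⊢
      exact iht
    · by_cases h1 : a.2.length = 1 <;>
        · simp [had, h1] at iht ⊢
          exact iht

theorem invA (ps : List (Int × Int)) : ps.Pairwise (fun p q => p.1 < q.1) →
    ps.foldl stepA ((PySem.Set.empty : PySem.Set Int),
       (PySem.Dict.empty : PySem.Dict Int (List Int)),
       (PySem.Dict.empty : PySem.Dict Int (List Int))) =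
      (PySem.Set.ofList (ps.map (·.2)),
       PySem.Dict.mk ((Gdict ps).items.filter (fun p => p.2.length == 1)),
       PySem.Dict.mk ((ps.filter (dblGuard ps)).map (fun p => (p.2, occAt ps p.2)))) := by
  induction ps using List.reverseRecOn with
  | nil => intro _; rfl
  | append_singleton ps p ih =>
    intro h
    obtain ⟨i, d⟩ := p
    rw [List.pairwise_append] at h
    obtain ⟨h1, -, hlt⟩ := h
    have hlt' : ∀ q ∈ ps, q.1 < i := fun q hq => by simpa using hlt q hq (i, d) (by simp)
    rw [List.foldl_append, List.foldl_cons, List.foldl_nil, ih h1]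
    by_cases hd : d ∈ ps.map (·.2)
    · -- d already seen
      have hset : PySem.Set.contains (PySem.Set.ofList (ps.map (·.2))) d = true :=
        (PySem.Set.contains_iff _ _).mpr ((PySem.Set.mem_ofList _ _).mpr hd)
      have hocc_ne : occAt ps d ≠ [] := (mem_vals_iff_occ ps d).mp hd
      have hconG : (Gdict ps).contains d = true := by
        rw [PySem.Dict.contains_iff_mem_keys, keys_Gdict]
        exact (PySem.Set.mem_ofList _ _).mpr hd
      simp only [stepA, hset, if_true]
      by_cases hc1 : (occAt ps d).length = 1
      · -- second occurrence: move from singles to doubles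
        obtain ⟨j, hj⟩ := List.length_eq_one_iff.mp hc1
        have hjin : j ∈ occAt ps d := by rw [hj]; simp
        obtain ⟨qj, hqj, hqj1, hqj2⟩ := occ_mem ps d j hjin
        have hjlt : j < i := hqj1 ▸ hlt' qj hqj
        have hconS : (PySem.Dict.mk ((Gdict ps).items.filter
            (fun p => p.2.length == 1))).contains d = true := (singles_contains ps d).mpr hc1
        simp only [hconS, if_true]
        have hgsame : ∀ q ∈ ps, dblGuard (ps ++ [(i, d)]) q = dblGuard ps q := by
          intro q hq
          by_cases hqd : q.2 = d
          · have hgo : dblGuard ps q = false := by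
              apply Bool.eq_false_iff.mpr; intro hg
              have := ((guard_iff ps q).mp hg).1
              rw [hqd, hc1] at this; omega
            have hgn : dblGuard (ps ++ [(i, d)]) q = false := by
              apply Bool.eq_false_iff.mpr; intro hg
              have h2 := ((guard_iff _ q).mp hg).2
              rw [hqd, occ_snoc_self, hj] at h2
              simp at h2
              exact absurd h2 (by have := hlt' q hq; omega)
            rw [hgo, hgn]
          · simp only [dblGuard, occ_snoc_ne ps i d q.2 hqd]
        have hgnew : dblGuard (ps ++ [(i, d)]) (i, d) = true := by
          apply (guard_iff _ _).mpr
          constructor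
          · show 1 < (occAt (ps ++ [(i,d)]) d).length
            rw [occ_snoc_self, hj]; simp
          · show (occAt (ps ++ [(i,d)]) d).getD 1 0 = i
            rw [occ_snoc_self, hj]; simp
        simp only [Prod.mk.injEq]
        refine ⟨?_, ?_, ?_⟩
        · simp only [List.map_append, List.map_cons, List.map_nil]
          rw [ofList_snoc]
          simp only [PySem.Set.add, hset, if_true]
        · apply PySem.Dict.ext
          simp only [PySem.Dict.erase]
          rw [Gdict_snoc]
          simp only [PySem.Dict.modify]
          rw [getD_Gdict]
          rw [PySem.Dict.items_insert_of_contains _ _ hconG]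
          refine Eq.symm (filter_map_replace _ d _ ?_ ?_)
          · rw [hj]; simp
          · intro p hp hpd
            have := items_Gdict_val ps hp
            rw [hpd] at this
            rw [this, hc1]
        · apply PySem.Dict.ext
          rw [singles_getD ps d hc1]
          have hconD : (PySem.Dict.mk ((ps.filter (dblGuard ps)).map
              (fun p => (p.2, occAt ps p.2)))).contains d = false := by
            apply Bool.eq_false_iff.mpr; intro hcd
            rw [PySem.Dict.contains_iff_mem_keys, keys_dbl] at hcd
            have := mem_dbl_keys ps d hcd
            omega
          simp only [PySem.Dict.modify, PySem.Dict.getD_insert_self,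
            PySem.Dict.insert_insert_self]
          rw [PySem.Dict.items_insert_of_not_contains _ _ hconD]
          rw [List.filter_append, List.filter_congr hgsame]
          simp only [List.filter_cons, hgnew, if_true, List.filter_nil, List.map_append]
          congr 1
          · refine Eq.symm (List.map_congr_left ?_)
            intro q hq
            have hgq := (List.mem_filter.mp hq).2
            have hqmem := (List.mem_filter.mp hq).1
            have hqd : q.2 ≠ d := by
              intro hqd
              have := ((guard_iff ps q).mp hgq).1
              rw [hqd, hc1] at this; omega
            rw [occ_snoc_ne ps i d q.2 hqd]
          · simp only [List.map_cons, List.map_nil]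
            rw [occ_snoc_self, hj]
      · -- third or later occurrence
        have hc2 : 1 < (occAt ps d).length := by
          have h0 : 0 < (occAt ps d).length := List.length_pos_iff.mpr hocc_ne
          omega
        have hconS : (PySem.Dict.mk ((Gdict ps).items.filter
            (fun p => p.2.length == 1))).contains d = false :=
          Bool.eq_false_iff.mpr (fun hcd => hc1 ((singles_contains ps d).mp hcd))
        simp only [hconS, Bool.false_eq_true, if_false]
        have hmemD : (d, occAt ps d) ∈ (ps.filter (dblGuard ps)).map
            (fun p => (p.2, occAt ps p.2)) := mem_dbl_items ps d hc2
        have hnodupD : (PySem.Dict.mk ((ps.filter (dblGuard ps)).map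
            (fun p => (p.2, occAt ps p.2)))).keys.Nodup := by
          rw [keys_dbl]; exact nodupL ps h1
        have hget : (PySem.Dict.mk ((ps.filter (dblGuard ps)).map
            (fun p => (p.2, occAt ps p.2)))).get? d = some (occAt ps d) :=
          PySem.Dict.get?_of_mem_items _ hmemD hnodupD
        have hconD : (PySem.Dict.mk ((ps.filter (dblGuard ps)).map
            (fun p => (p.2, occAt ps p.2)))).contains d = true := by
          rw [PySem.Dict.contains_eq_isSome_get?, hget]; rfl
        have hsec_lt : (occAt ps d).getD 1 0 < i := by
          have hmem : (occAt ps d).getD 1 0 ∈ occAt ps d := by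
            rw [List.getD_eq_getElem _ _ hc2]; exact List.getElem_mem hc2
          obtain ⟨q, hq, hq1, -⟩ := occ_mem ps d _ hmem
          rw [← hq1]; exact hlt' q hq
        have hgsame : ∀ q ∈ ps, dblGuard (ps ++ [(i, d)]) q = dblGuard ps q := by
          intro q hq
          by_cases hqd : q.2 = d
          · have e2 : (occAt ps d ++ [i]).getD 1 0 = (occAt ps d).getD 1 0 :=
              List.getD_append _ _ _ _ hc2
            have hb : ∀ (a b : Bool), (a = true ↔ b = true) → a = b := by decide
            apply hb
            rw [guard_iff, guard_iff, hqd, occ_snoc_self, e2]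
            constructor
            · rintro ⟨-, h2⟩; exact ⟨hc2, h2⟩
            · rintro ⟨-, h2⟩
              refine ⟨?_, h2⟩
              rw [List.length_append]; simp only [List.length_cons, List.length_nil]; omega
          · simp only [dblGuard, occ_snoc_ne ps i d q.2 hqd]
        have hgnewF : dblGuard (ps ++ [(i, d)]) (i, d) = false := by
          apply Bool.eq_false_iff.mpr; intro hg
          have h2 := ((guard_iff _ _).mp hg).2
          simp only at h2
          rw [occ_snoc_self, List.getD_append _ _ _ _ hc2] at h2
          omega
        simp only [Prod.mk.injEq]
        refine ⟨?_, ?_, ?_⟩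
        · simp only [List.map_append, List.map_cons, List.map_nil]
          rw [ofList_snoc]
          simp only [PySem.Set.add, hset, if_true]
        · apply PySem.Dict.ext
          rw [Gdict_snoc]
          simp only [PySem.Dict.modify]
          rw [getD_Gdict]
          rw [PySem.Dict.items_insert_of_contains _ _ hconG]
          refine Eq.symm (filter_map_replace₂ _ d _ ?_ ?_)
          · simp; omega
          · intro p hp hpd
            have := items_Gdict_val ps hp
            rw [hpd] at this
            rw [this]; omega
        · apply PySem.Dict.ext
          simp only [PySem.Dict.modify]
          rw [PySem.Dict.getD_eq_get?_getD, hget]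
          simp only [Option.getD_some]
          rw [PySem.Dict.items_insert_of_contains _ _ hconD]
          rw [List.filter_append, List.filter_congr hgsame]
          simp only [List.filter_cons, hgnewF, Bool.false_eq_true, if_false,
            List.filter_nil, List.append_nil]
          rw [List.map_map]
          refine List.map_congr_left ?_
          intro q hq
          have hgq := (List.mem_filter.mp hq).2
          simp only [Function.comp_apply]
          by_cases hqd : q.2 = d
          · simp only [hqd, beq_self_eq_true, if_true]
            rw [occ_snoc_self]
          · simp only [beq_iff_eq, hqd, if_false]
            rw [occ_snoc_ne ps i d q.2 hqd]
    · -- first occurrence of d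
      have hocc : occAt ps d = [] := by
        by_contra h0; exact hd ((mem_vals_iff_occ ps d).mpr h0)
      have hset : PySem.Set.contains (PySem.Set.ofList (ps.map (·.2))) d = false :=
        Bool.eq_false_iff.mpr (fun hc =>
          hd ((PySem.Set.mem_ofList _ _).mp ((PySem.Set.contains_iff _ _).mp hc)))
      have hconG : (Gdict ps).contains d = false := by
        apply Bool.eq_false_iff.mpr; intro hc
        rw [PySem.Dict.contains_iff_mem_keys, keys_Gdict] at hc
        exact hd ((PySem.Set.mem_ofList _ _).mp hc)
      have hne : ∀ q ∈ ps, q.2 ≠ d := fun q hq hqd => hd (List.mem_map.mpr ⟨q, hq, hqd⟩)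
      simp only [stepA, hset, Bool.false_eq_true, if_false]
      simp only [Prod.mk.injEq]
      refine ⟨?_, ?_, ?_⟩
      · simp only [List.map_append, List.map_cons, List.map_nil]
        rw [ofList_snoc]
      · have hconS : (PySem.Dict.mk ((Gdict ps).items.filter
            (fun p => p.2.length == 1))).contains d = false := by
          apply Bool.eq_false_iff.mpr; intro hc
          have := (singles_contains ps d).mp hc
          rw [hocc] at this; simp at this
        apply PySem.Dict.ext
        rw [PySem.Dict.items_insert_of_not_contains _ _ hconS]
        rw [Gdict_snoc]
        simp only [PySem.Dict.modify]
        rw [getD_Gdict, hocc]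
        rw [PySem.Dict.items_insert_of_not_contains _ _ hconG]
        rw [List.filter_append]
        simp
      · apply PySem.Dict.ext
        have hg0 : dblGuard (ps ++ [(i, d)]) (i, d) = false := by
          apply Bool.eq_false_iff.mpr; intro hg
          have := ((guard_iff _ _).mp hg).1
          simp only at this
          rw [occ_snoc_self, hocc] at this
          simp at this
        have hgsame : ∀ q ∈ ps, dblGuard (ps ++ [(i, d)]) q = dblGuard ps q := by
          intro q hq
          simp only [dblGuard, occ_snoc_ne ps i d q.2 (hne q hq)]
        rw [List.filter_append, List.filter_congr hgsame]
        simp only [List.filter_cons, hg0, Bool.false_eq_true, if_false,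
          List.filter_nil, List.append_nil]
        refine Eq.symm (List.map_congr_left ?_)
        intro q hq
        have hqmem := (List.mem_filter.mp hq).1
        rw [occ_snoc_ne ps i d q.2 (hne q hqmem)]

-- the common canonical value of both ports
def canonPair (term : List Int) : (List (Int × List Int)) × (List (Int × List Int)) :=
  ((Gdict (PySem.List.enumerate term)).items.filter (fun p => p.2.length == 1),
   ((PySem.List.enumerate term).filter (dblGuard (PySem.List.enumerate term))).map
     (fun p => (p.2, occAt (PySem.List.enumerate term) p.2)))

theorem A_eq (term : List Int) : find_double_indices term = canonPair term := by
  have h1 := invA (PySem.List.enumerate term) (PySem.List.pairwise_lt_enumerate term 0)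
  have h2 : (PySem.List.pyRange 0 ((term.length : Int)) 1).foldl
      (fun st j => stepA st (j, PySem.List.pyGetD term j 0))
      ((PySem.Set.empty : PySem.Set Int),
       (PySem.Dict.empty : PySem.Dict Int (List Int)),
       (PySem.Dict.empty : PySem.Dict Int (List Int)))
      = (PySem.List.enumerate term).foldl stepA
      ((PySem.Set.empty : PySem.Set Int),
       (PySem.Dict.empty : PySem.Dict Int (List Int)),
       (PySem.Dict.empty : PySem.Dict Int (List Int))) := by
    conv_rhs => rw [PySem.List.enumerate_eq_map_pyRange term 0]
    rw [List.foldl_map]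
    simp only [PySem.List.len_eq]
  exact congrArg (fun st => (st.2.1.items, st.2.2.items)) (h2.trans h1)

theorem B_eq (term : List Int) : find_double_indices_alt term = canonPair term := by
  have hpw := PySem.List.pairwise_lt_enumerate term 0
  have hsingles : (Gdict (PySem.List.enumerate term)).items.foldl
      (fun d p => if p.2.length == 1 then d.insert p.1 p.2 else d)
      (PySem.Dict.empty : PySem.Dict Int (List Int))
      = PySem.Dict.mk ((Gdict (PySem.List.enumerate term)).items.filter
          (fun p => p.2.length == 1)) := by
    rw [PySem.List.foldl_if_eq_foldl_filter]
    apply PySem.Dict.ext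
    have hfresh := PySem.Dict.items_foldl_insert_fresh
      ((Gdict (PySem.List.enumerate term)).items.filter (fun p => p.2.length == 1))
      (fun p => p.1) (fun p => p.2) PySem.Dict.empty
      (fun a _ => by simp [PySem.Dict.contains_empty])
      (by have := nodup_keys_singles (PySem.List.enumerate term)
          rwa [PySem.Dict.keys_mk] at this)
    simpa using hfresh
  have hdoubles : (PySem.List.enumerate term).foldl
      (fun d p =>
        if ((Gdict (PySem.List.enumerate term)).getD p.2 []).length > 1 &&
            (PySem.List.pyGetD ((Gdict (PySem.List.enumerate term)).getD p.2 []) 1 0 == p.1)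
        then d.insert p.2 ((Gdict (PySem.List.enumerate term)).getD p.2 []) else d)
      (PySem.Dict.empty : PySem.Dict Int (List Int))
      = PySem.Dict.mk (((PySem.List.enumerate term).filter
          (dblGuard (PySem.List.enumerate term))).map
            (fun p => (p.2, occAt (PySem.List.enumerate term) p.2))) := by
    have hb : (fun (dd : PySem.Dict Int (List Int)) (p : Int × Int) =>
        if ((Gdict (PySem.List.enumerate term)).getD p.2 []).length > 1 &&
            (PySem.List.pyGetD ((Gdict (PySem.List.enumerate term)).getD p.2 []) 1 0 == p.1)
        then dd.insert p.2 ((Gdict (PySem.List.enumerate term)).getD p.2 []) else dd)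
        = (fun dd p => if dblGuard (PySem.List.enumerate term) p
            then dd.insert p.2 (occAt (PySem.List.enumerate term) p.2) else dd) := by
      funext dd p
      rw [getD_Gdict]
      rfl
    rw [hb, PySem.List.foldl_if_eq_foldl_filter]
    apply PySem.Dict.ext
    have hfresh := PySem.Dict.items_foldl_insert_fresh
      ((PySem.List.enumerate term).filter (dblGuard (PySem.List.enumerate term)))
      (fun p => p.2) (fun p => occAt (PySem.List.enumerate term) p.2) PySem.Dict.empty
      (fun a _ => by simp [PySem.Dict.contains_empty])
      (nodupL (PySem.List.enumerate term) hpw)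
    simpa using hfresh
  exact congrArg₂ (fun (s t : PySem.Dict Int (List Int)) => (s.items, t.items))
    hsingles hdoubles

-- ===== VERDICT (by name: the statement is the Claim_ definition above) =====
theorem find_double_indices_spec : Claim_equal_find_double_indices := by
  intro term _
  unfold Spec_find_double_indices
  rw [A_eq, B_eq]
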